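-- pv_equiv track=rewrite | github.com/iharnoor/PhylogeneticsWebsite | ParsingTxt/Launcher/Rough.py | symbolReplacement
-- ===== SOURCE A (Python) =====
-- def symbolReplacement(val):
--     val2 = ""
--     for i in val:
--         asciiVal = ord(i)
--         if (47 < asciiVal < 60) or (asciiVal == 0) or 96 < asciiVal < 123 or (
--                 64 < asciiVal < 91) or asciiVal == 40 or asciiVal == 41 or asciiVal == 44:
--             val2 += i
--         else:
--             val.replace(i, str(asciiVal))
--             val2 += "ASC" + str(asciiVal)
--
--     return val2
-- ===== SOURCE B (Python) =====
-- def symbolReplacement(val):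
--     def allowed(a):
--         return (47 < a < 60) or a == 0 or 96 < a < 123 or 64 < a < 91 or a in (40, 41, 44)
--     table = {ord(c): "ASC" + str(ord(c)) for c in set(val) if not allowed(ord(c))}
--     return val.translate(table)
-- ===== Notes on version B (the rewrite author's own statement) =====
-- stated objective: idiomatic
-- what changed: A's per-character string-concatenation loop is replaced by building a translation table once over the distinct characters (dict comprehension over set(val)) and a single str.translate call; A's dead val.replace line is dropped.
import Mathlib
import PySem

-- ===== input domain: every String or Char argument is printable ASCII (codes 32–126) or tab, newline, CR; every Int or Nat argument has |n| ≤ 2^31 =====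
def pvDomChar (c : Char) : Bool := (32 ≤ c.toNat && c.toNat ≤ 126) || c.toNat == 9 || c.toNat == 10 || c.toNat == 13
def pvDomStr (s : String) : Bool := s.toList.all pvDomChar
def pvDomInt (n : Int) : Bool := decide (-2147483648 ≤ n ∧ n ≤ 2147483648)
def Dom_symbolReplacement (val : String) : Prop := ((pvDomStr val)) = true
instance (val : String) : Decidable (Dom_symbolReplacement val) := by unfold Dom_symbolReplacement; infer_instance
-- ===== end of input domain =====

-- B replaces A's per-character concatenation loop by a translation table built once over the
-- distinct characters, then a single translate pass (objective: idiomatic). The dead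
-- 'val.replace' line of A has no effect and is dropped. Return-value equivalence only.

-- ===== PORT A =====
def symbolReplacement (val : String) : String :=
  val.toList.foldl (fun val2 i =>
    let asciiVal : Int := (i.toNat : Int)
    if (47 < asciiVal ∧ asciiVal < 60) ∨ asciiVal = 0 ∨ (96 < asciiVal ∧ asciiVal < 123) ∨
        (64 < asciiVal ∧ asciiVal < 91) ∨ asciiVal = 40 ∨ asciiVal = 41 ∨ asciiVal = 44 then
      val2 ++ String.singleton i
    else
      -- 'val.replace(i, str(asciiVal))' in A is dead code (result discarded); no effect
      val2 ++ ("ASC" ++ PySem.Int.toStr asciiVal)) ""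

-- ===== PORT B =====
-- B's helper 'allowed'
def pvAllowedB (a : Int) : Bool :=
  (47 < a && a < 60) || a == 0 || (96 < a && a < 123) || (64 < a && a < 91)
    || a == 40 || a == 41 || a == 44

def symbolReplacement_alt (val : String) : String :=
  -- dict comprehension over set(val) (Dict only looked up afterwards; values depend on key only)
  let table : PySem.Dict Int String :=
    (PySem.Set.ofList val.toList).foldl
      (fun d c => if pvAllowedB (c.toNat : Int) then d
                  else d.insert (c.toNat : Int) ("ASC" ++ PySem.Int.toStr (c.toNat : Int)))
      PySem.Dict.empty
  -- val.translate(table): hand port, exact — each char is replaced by table[ord c] if present,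
  -- kept unchanged otherwise
  String.join (val.toList.map (fun c => (table.get? (c.toNat : Int)).getD (String.singleton c)))

-- ===== PRECONDITION & SPEC =====
def Spec_symbolReplacement (val : String) (out : String) : Prop := out = symbolReplacement_alt val
instance (val : String) (out : String) : Decidable (Spec_symbolReplacement val out) := by unfold Spec_symbolReplacement; infer_instance

-- ===== CLAIM (what is proved, stated in full; the proofs are below) =====
def Claim_equal_symbolReplacement : Prop := ∀ (val : String), Dom_symbolReplacement val → Spec_symbolReplacement val (symbolReplacement val)

-- ===== LEMMAS AND PROOFS =====

theorem pvKey_inj {a c : Char} (h : (a.toNat : Int) = (c.toNat : Int)) : a = c := by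
  have h2 : a.toNat = c.toNat := by exact_mod_cast h
  exact Char.ext (UInt32.toNat_inj.mp h2)

-- lookup in the table built by B's dict comprehension
theorem pv_build_get (l : List Char) (d0 : PySem.Dict Int String) (c : Char) :
    (l.foldl (fun d a => if pvAllowedB (a.toNat : Int) then d
                  else d.insert (a.toNat : Int) ("ASC" ++ PySem.Int.toStr (a.toNat : Int))) d0).get?
      (c.toNat : Int)
    = if (¬ pvAllowedB (c.toNat : Int) = true) ∧ c ∈ l then
        some ("ASC" ++ PySem.Int.toStr (c.toNat : Int))
      else d0.get? (c.toNat : Int) := by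
  induction l generalizing d0 with
  | nil => simp
  | cons a l ih =>
    simp only [List.foldl_cons, ih]
    by_cases hmem : (¬ pvAllowedB (c.toNat : Int) = true) ∧ c ∈ l
    · simp [hmem, List.mem_cons]
    · simp only [if_neg hmem]
      by_cases hac : a = c
      · subst hac
        by_cases hall : pvAllowedB (a.toNat : Int) = true
        · simp [hall, List.mem_cons]
        · simp [hall, PySem.Dict.get?_insert_self, List.mem_cons]
      · have hk : (c.toNat : Int) ≠ (a.toNat : Int) := fun h => hac (pvKey_inj h).symm
        have hrhs : ¬ ((¬ pvAllowedB (c.toNat : Int) = true) ∧ c ∈ a :: l) := by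
          intro ⟨h1, h2⟩
          rcases List.mem_cons.mp h2 with h | h
          · exact hac h.symm
          · exact hmem ⟨h1, h⟩
        rw [if_neg hrhs]
        by_cases hall : pvAllowedB (a.toNat : Int) = true
        · rw [if_pos hall]
        · rw [if_neg hall, PySem.Dict.get?_insert]
          rw [if_neg hk]

theorem pv_join_shift (L : List String) (s : String) :
    L.foldl (fun r t => r ++ t) s = s ++ String.join L := by
  induction L generalizing s with
  | nil => simp [String.join]
  | cons a L ih =>
    show L.foldl (fun r t => r ++ t) (s ++ a) = s ++ String.join (a :: L)
    rw [ih]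
    have hj : String.join (a :: L) = a ++ String.join L := by
      show List.foldl (fun r t => r ++ t) ("" ++ a) L = a ++ String.join L
      rw [show ("" : String) ++ a = a by simp, ih]
    rw [hj, String.append_assoc]

-- A's loop as a join of per-character pieces
theorem pv_foldl_append (f : Char → String) (l : List Char) (s : String) :
    l.foldl (fun acc c => acc ++ f c) s = s ++ String.join (l.map f) := by
  have : l.foldl (fun acc c => acc ++ f c) s = (l.map f).foldl (fun r t => r ++ t) s := by
    induction l generalizing s with
    | nil => rfl
    | cons a l ih => simp [ih]
  rw [this, pv_join_shift]

-- A's inline condition agrees with B's helper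
theorem pv_cond_iff (a : Int) :
    ((47 < a ∧ a < 60) ∨ a = 0 ∨ (96 < a ∧ a < 123) ∨ (64 < a ∧ a < 91) ∨ a = 40 ∨ a = 41 ∨ a = 44)
    ↔ pvAllowedB a = true := by
  simp only [pvAllowedB, Bool.or_eq_true, Bool.and_eq_true, decide_eq_true_eq, beq_iff_eq]
  omega

-- ===== VERDICT (by name: the statement is the Claim_ definition above) =====
theorem symbolReplacement_spec : Claim_equal_symbolReplacement := by
  intro val _
  show symbolReplacement val = symbolReplacement_alt val
  simp only [symbolReplacement, symbolReplacement_alt]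
  have hfun : (fun (val2 : String) (i : Char) =>
      if (47 < (i.toNat : Int) ∧ (i.toNat : Int) < 60) ∨ (i.toNat : Int) = 0 ∨
          (96 < (i.toNat : Int) ∧ (i.toNat : Int) < 123) ∨ (64 < (i.toNat : Int) ∧ (i.toNat : Int) < 91) ∨
          (i.toNat : Int) = 40 ∨ (i.toNat : Int) = 41 ∨ (i.toNat : Int) = 44 then
        val2 ++ String.singleton i
      else val2 ++ ("ASC" ++ PySem.Int.toStr (i.toNat : Int)))
      = fun val2 i => val2 ++ (if (47 < (i.toNat : Int) ∧ (i.toNat : Int) < 60) ∨ (i.toNat : Int) = 0 ∨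
          (96 < (i.toNat : Int) ∧ (i.toNat : Int) < 123) ∨ (64 < (i.toNat : Int) ∧ (i.toNat : Int) < 91) ∨
          (i.toNat : Int) = 40 ∨ (i.toNat : Int) = 41 ∨ (i.toNat : Int) = 44 then String.singleton i
        else "ASC" ++ PySem.Int.toStr (i.toNat : Int)) := by
    funext v i; split <;> rfl
  rw [hfun, pv_foldl_append]
  have hnil : ∀ s : String, "" ++ s = s := fun s => by simp
  rw [hnil]
  congr 1
  apply List.map_congr_left
  intro c hc
  rw [pv_build_get]
  have hmem : c ∈ PySem.Set.ofList val.toList := by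
    simpa [PySem.Set.mem_ofList] using hc
  rw [if_congr (pv_cond_iff ((c.toNat : Int))) rfl rfl]
  by_cases hall : pvAllowedB (c.toNat : Int) = true
  · rw [if_pos hall, if_neg (by simp [hall])]
    rfl
  · rw [if_neg hall, if_pos ⟨hall, hmem⟩]
    rfl
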